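-- pv_equiv track=rewrite | github.com/lzhoang2801/OpCore-Simplify | Scripts/acpi_guru.py | findall_power_resource_blocks
-- ===== SOURCE A (Python) =====
-- def findall_power_resource_blocks(table_lines):
--     power_resource_blocks = []
--
--     i = 0
--     while i < len(table_lines):
--         line = table_lines[i].strip()
--         if line.startswith("PowerResource"):
--             start_index = i
--             open_brackets = 1
--             i += 1
--             while i < len(table_lines) and open_brackets > 0:
--                 if '{' in table_lines[i]:
--                     open_brackets += table_lines[i].count('{')
--                 if '}' in table_lines[i]:
--                     open_brackets -= table_lines[i].count('}')
--                 i += 1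
--             end_index = i - 1
--             power_resource_blocks.append((start_index, end_index))
--         else:
--             i += 1
--
--     return power_resource_blocks
-- ===== SOURCE B (Python) =====
-- def findall_power_resource_blocks(table_lines):
--     n = len(table_lines)
--     # prefix[k] = brace balance of the first k lines
--     prefix = [0]
--     total = 0
--     for line in table_lines:
--         total += line.count('{') - line.count('}')
--         prefix.append(total)
--     blocks = []
--     i = 0
--     while i < n:
--         if table_lines[i].strip().startswith("PowerResource"):
--             start = i
--             target = prefix[start + 1] - 1
--             end = n - 1
--             for j in range(start + 1, n):
--                 if prefix[j + 1] <= target: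
--                     end = j
--                     break
--             blocks.append((start, end))
--             i = end + 1
--         else:
--             i += 1
--     return blocks
-- ===== Notes on version B (the rewrite author's own statement) =====
-- stated objective: alternative
-- what changed: A counts open braces statefully in a nested while loop per block; B precomputes a prefix-sum array of per-line brace balance once and finds each block's end by a threshold comparison against that array.
import Mathlib
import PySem

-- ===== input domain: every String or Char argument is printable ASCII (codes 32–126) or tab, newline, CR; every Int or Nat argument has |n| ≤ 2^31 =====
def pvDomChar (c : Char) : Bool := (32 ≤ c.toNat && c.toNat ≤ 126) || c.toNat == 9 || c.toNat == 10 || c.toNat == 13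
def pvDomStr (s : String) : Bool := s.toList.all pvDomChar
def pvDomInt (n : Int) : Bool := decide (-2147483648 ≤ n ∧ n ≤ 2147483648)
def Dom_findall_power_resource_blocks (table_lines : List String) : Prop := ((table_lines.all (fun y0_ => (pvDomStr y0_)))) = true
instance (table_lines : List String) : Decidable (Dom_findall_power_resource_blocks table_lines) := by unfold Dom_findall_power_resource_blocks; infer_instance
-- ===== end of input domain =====

-- B replaces A's stateful nested brace-counting loop by a precomputed prefix-sum array of
-- per-line brace balance, finding each block end by a threshold search in that array
-- (objective: alternative — same asymptotic cost, different decomposition).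

-- ===== PORT A =====
-- inner 'while i < len(table_lines) and open_brackets > 0' loop; returns the final i
def findA_inner (tl : List String) (i : Nat) (opens : Int) : Nat :=
  if h : i < tl.length ∧ 0 < opens then
    let line := tl.getD i ""          -- table_lines[i]; i < len here, so getD is exact
    let o1 := if PySem.Str.isIn "{" line then opens + (PySem.Str.count line "{" : Int) else opens
    let o2 := if PySem.Str.isIn "}" line then o1 - (PySem.Str.count line "}" : Int) else o1
    findA_inner tl (i + 1) o2
  else i
  termination_by tl.length - i
  decreasing_by omega

-- the inner loop never moves i backwards (needed for the outer loop's termination)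
theorem findA_inner_le (tl : List String) (i : Nat) (opens : Int) : i ≤ findA_inner tl i opens := by
  rw [findA_inner]
  split
  · exact le_trans (by omega) (findA_inner_le tl (i + 1) _)
  · exact le_refl i
  termination_by tl.length - i
  decreasing_by omega

-- outer 'while i < len(table_lines)' loop, accumulating power_resource_blocks
def findA_outer (tl : List String) (i : Nat) (acc : List (Int × Int)) : List (Int × Int) :=
  if h : i < tl.length then
    if PySem.Str.startswith (PySem.Str.strip (tl.getD i "")) "PowerResource" then
      let j := findA_inner tl (i + 1) 1
      findA_outer tl j (acc ++ [((i : Int), (j : Int) - 1)])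
    else findA_outer tl (i + 1) acc
  else acc
  termination_by tl.length - i
  decreasing_by
  · have := findA_inner_le tl (i + 1) 1; omega
  · omega

def findall_power_resource_blocks (table_lines : List String) : List (Int × Int) :=
  findA_outer table_lines 0 []

-- ===== PORT B =====
-- prefix[k] = brace balance of the first k lines (built by the 'for line in table_lines' loop)
def findB_prefix (tl : List String) : List Int :=
  (tl.foldl (fun (st : List Int × Int) line =>
      let t := st.2 + (PySem.Str.count line "{" : Int) - (PySem.Str.count line "}" : Int)
      (st.1 ++ [t], t)) ([0], 0)).1

-- 'for j in range(start+1, n): if prefix[j+1] <= target: end = j; break' with default end = n-1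
def findB_search (tl : List String) (pre : List Int) (target : Int) (j : Nat) : Nat :=
  if h : j < tl.length then
    if pre.getD (j + 1) 0 ≤ target then j   -- prefix[j+1]; j+1 ≤ len(prefix)-1 here, so getD is exact
    else findB_search tl pre target (j + 1)
  else tl.length - 1
  termination_by tl.length - j
  decreasing_by omega

-- the search never lands before a given index i < n when started above it (termination helper)
theorem findB_search_ge (tl : List String) (pre : List Int) (t : Int) (i : Nat)
    (hi : i < tl.length) (j : Nat) (hj : i < j) : i ≤ findB_search tl pre t j := by
  rw [findB_search]
  split
  · split
    · omega
    · exact findB_search_ge tl pre t i hi (j + 1) (by omega)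
  · omega
  termination_by tl.length - j
  decreasing_by omega

-- 'while i < n' loop over block starts, jumping i past each found block
def findB_outer (tl : List String) (pre : List Int) (i : Nat) (acc : List (Int × Int)) : List (Int × Int) :=
  if h : i < tl.length then
    if PySem.Str.startswith (PySem.Str.strip (tl.getD i "")) "PowerResource" then
      let e := findB_search tl pre (pre.getD (i + 1) 0 - 1) (i + 1)
      findB_outer tl pre (e + 1) (acc ++ [((i : Int), (e : Int))])
    else findB_outer tl pre (i + 1) acc
  else acc
  termination_by tl.length - i
  decreasing_by
  · have := findB_search_ge tl pre (pre.getD (i + 1) 0 - 1) i h (i + 1) (by omega); omega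
  · omega

def findall_power_resource_blocks_alt (table_lines : List String) : List (Int × Int) :=
  findB_outer table_lines (findB_prefix table_lines) 0 []

-- ===== PRECONDITION & SPEC =====
def Spec_findall_power_resource_blocks (table_lines : List String) (out : List (Int × Int)) : Prop := out = findall_power_resource_blocks_alt table_lines
instance (table_lines : List String) (out : List (Int × Int)) : Decidable (Spec_findall_power_resource_blocks table_lines out) := by unfold Spec_findall_power_resource_blocks; infer_instance

-- ===== CLAIM (what is proved, stated in full; the proofs are below) =====
def Claim_equal_findall_power_resource_blocks : Prop := ∀ (table_lines : List String), Dom_findall_power_resource_blocks table_lines → Spec_findall_power_resource_blocks table_lines (findall_power_resource_blocks table_lines)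

-- ===== LEMMAS AND PROOFS =====

-- per-line brace balance and its prefix sums
def dlt (line : String) : Int := (PySem.Str.count line "{" : Int) - (PySem.Str.count line "}" : Int)
def pfx (tl : List String) (k : Nat) : Int := ((tl.take k).map dlt).sum

theorem pfx_zero (tl : List String) : pfx tl 0 = 0 := rfl

theorem pfx_cons (l : String) (ls : List String) (k : Nat) :
    pfx (l :: ls) (k + 1) = dlt l + pfx ls k := by
  simp [pfx, List.take_succ_cons]

theorem pfx_one (l : String) (ls : List String) : pfx (l :: ls) 1 = dlt l := by
  simp [pfx]

theorem pfx_succ (tl : List String) (k : Nat) (h : k < tl.length) :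
    pfx tl (k + 1) = pfx tl k + dlt (tl.getD k "") := by
  have h' : k < (tl.map dlt).length := by simpa using h
  unfold pfx
  rw [List.map_take, List.map_take, List.sum_take_succ _ k h', List.getElem_map,
    List.getD_eq_getElem _ _ h]

-- a substring that is not in a string occurs 0 times (what A's 'if sub in line' guards encode)
theorem count_go_not_infix {sub : List Char} :
    ∀ (fuel : Nat) (l : List Char) (acc : Nat), ¬ sub <:+: l → PySem.Chars.count.go sub fuel l acc = acc := by
  intro fuel
  induction fuel with
  | zero => intro l acc _; cases l <;> rfl
  | succ f ih =>
    intro l acc h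
    cases l with
    | nil => rfl
    | cons x t =>
      rw [PySem.Chars.count.go]
      have hp : ¬ sub.isPrefixOf (x :: t) = true := by
        rw [List.isPrefixOf_iff_prefix]
        exact fun hpre => h hpre.isInfix
      rw [if_neg hp]
      exact ih t acc (fun hinf => h (hinf.trans ((t.suffix_cons x).isInfix)))

theorem str_count_zero_of_not_isIn (line sub : String) (hne : sub.toList ≠ [])
    (h : ¬ PySem.Str.isIn sub line = true) : PySem.Str.count line sub = 0 := by
  have hinf : ¬ sub.toList <:+: line.toList := by
    rw [← PySem.Str.isIn_iff_infix]; exact h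
  rw [PySem.Str.count_eq]
  unfold PySem.Chars.count
  rw [if_neg (by simp [List.isEmpty_iff, hne])]
  exact count_go_not_infix _ _ _ hinf

-- A's two guarded updates together add exactly the line's brace balance
theorem guarded_update (line : String) (opens : Int) :
    (if PySem.Str.isIn "}" line
       then (if PySem.Str.isIn "{" line then opens + (PySem.Str.count line "{" : Int) else opens)
            - (PySem.Str.count line "}" : Int)
       else (if PySem.Str.isIn "{" line then opens + (PySem.Str.count line "{" : Int) else opens))
    = opens + dlt line := by
  unfold dlt
  by_cases h1 : PySem.Str.isIn "{" line = true <;> by_cases h2 : PySem.Str.isIn "}" line = true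
  · rw [if_pos h2, if_pos h1]; omega
  · rw [if_neg h2, if_pos h1,
      str_count_zero_of_not_isIn line "}" (by decide) h2]
    push_cast; ring
  · rw [if_pos h2, if_neg h1,
      str_count_zero_of_not_isIn line "{" (by decide) h1]
    push_cast; ring
  · rw [if_neg h2, if_neg h1,
      str_count_zero_of_not_isIn line "{" (by decide) h1,
      str_count_zero_of_not_isIn line "}" (by decide) h2]
    push_cast; ring

-- findB_prefix is the table of pfx
theorem fold_spec (tl : List String) : ∀ (acc : List Int) (t : Int),
    (tl.foldl (fun (st : List Int × Int) line =>
        let t' := st.2 + (PySem.Str.count line "{" : Int) - (PySem.Str.count line "}" : Int)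
        (st.1 ++ [t'], t')) (acc, t)).1
      = acc ++ (List.range tl.length).map (fun k => t + pfx tl (k + 1)) := by
  induction tl with
  | nil => intro acc t; simp
  | cons l ls ih =>
    intro acc t
    simp only [List.foldl_cons]
    rw [ih]
    have hstep : t + (PySem.Str.count l "{" : Int) - (PySem.Str.count l "}" : Int) = t + dlt l := by
      unfold dlt; omega
    simp only [hstep]
    rw [List.length_cons, List.range_succ_eq_map]
    simp only [List.map_cons, List.map_map, List.append_assoc]
    congr 1
    simp only [List.singleton_append]
    congr 1
    · rw [pfx_one]
    · apply List.map_congr_left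
      intro k _
      simp only [Function.comp_apply, Nat.succ_eq_add_one, pfx_cons]
      ring

theorem prefix_eq (tl : List String) :
    findB_prefix tl = (List.range (tl.length + 1)).map (pfx tl) := by
  unfold findB_prefix
  rw [fold_spec tl [0] 0, List.range_succ_eq_map]
  simp [pfx_zero, List.map_map]

theorem getD_prefix (tl : List String) (k : Nat) (h : k ≤ tl.length) :
    (findB_prefix tl).getD k 0 = pfx tl k := by
  rw [prefix_eq]
  rw [List.getD_eq_getElem _ _ (by simpa using Nat.lt_succ_of_le h)]
  simp

-- main lemma: A's inner brace loop lands one past B's threshold search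
theorem inner_eq (tl : List String) (c : Int) (j : Nat)
    (h1 : 1 ≤ j) (h2 : j ≤ tl.length) (h3 : 0 < c + pfx tl j) :
    findA_inner tl j (c + pfx tl j) = findB_search tl (findB_prefix tl) (-c) j + 1 := by
  rw [findA_inner, findB_search]
  by_cases hjn : j < tl.length
  · rw [dif_pos ⟨hjn, h3⟩, dif_pos hjn]
    simp only []
    rw [guarded_update (tl.getD j ""), add_assoc, ← pfx_succ tl j hjn,
      getD_prefix tl (j + 1) (by omega)]
    by_cases hend : pfx tl (j + 1) ≤ -c
    · rw [if_pos hend, findA_inner, dif_neg (by omega)]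
    · rw [if_neg hend]
      exact inner_eq tl c (j + 1) (by omega) (by omega) (by omega)
  · rw [dif_neg (by omega), dif_neg hjn]
    omega
  termination_by tl.length - j
  decreasing_by omega

-- the two outer loops agree
theorem outer_eq (tl : List String) (i : Nat) (acc : List (Int × Int)) :
    findA_outer tl i acc = findB_outer tl (findB_prefix tl) i acc := by
  rw [findA_outer, findB_outer]
  by_cases hin : i < tl.length
  · rw [dif_pos hin, dif_pos hin]
    by_cases hs : PySem.Str.startswith (PySem.Str.strip (tl.getD i "")) "PowerResource" = true
    · rw [if_pos hs, if_pos hs]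
      simp only []
      have hge : i ≤ findB_search tl (findB_prefix tl) (-(1 - pfx tl (i + 1))) (i + 1) :=
        findB_search_ge tl (findB_prefix tl) _ i hin (i + 1) (by omega)
      have hj : findA_inner tl (i + 1) 1
          = findB_search tl (findB_prefix tl) (-(1 - pfx tl (i + 1))) (i + 1) + 1 := by
        have h := inner_eq tl (1 - pfx tl (i + 1)) (i + 1) (by omega) (by omega) (by omega)
        rw [show (1 - pfx tl (i + 1)) + pfx tl (i + 1) = 1 from by ring] at h
        exact h
      have htgt : (findB_prefix tl).getD (i + 1) 0 - 1 = -(1 - pfx tl (i + 1)) := by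
        rw [getD_prefix tl (i + 1) (by omega)]; omega
      rw [htgt]
      rw [hj]
      have hpair : ((findB_search tl (findB_prefix tl) (-(1 - pfx tl (i + 1))) (i + 1) + 1 : Nat) : Int) - 1
          = ((findB_search tl (findB_prefix tl) (-(1 - pfx tl (i + 1))) (i + 1) : Nat) : Int) := by
        push_cast; ring
      rw [hpair]
      exact outer_eq tl (findB_search tl (findB_prefix tl) (-(1 - pfx tl (i + 1))) (i + 1) + 1)
        (acc ++ [((i : Int), ((findB_search tl (findB_prefix tl) (-(1 - pfx tl (i + 1))) (i + 1) : Nat) : Int))])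
    · rw [if_neg hs, if_neg hs]
      exact outer_eq tl (i + 1) acc
  · rw [dif_neg hin, dif_neg hin]
  termination_by tl.length - i
  decreasing_by all_goals omega

-- ===== VERDICT (by name: the statement is the Claim_ definition above) =====
theorem findall_power_resource_blocks_spec : Claim_equal_findall_power_resource_blocks := by
  intro tl _
  unfold Spec_findall_power_resource_blocks findall_power_resource_blocks findall_power_resource_blocks_alt
  exact outer_eq tl 0 []
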